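-- pv_equiv track=rewrite | github.com/robert/PySkyWiFi | src/PySkyWiFi/base26.py | b26_encode
-- ===== SOURCE A (Python) =====
-- def b26_encode(input_string):
--     # Convert input string to a base-256 integer
--     base256_int = 0
--     for char in input_string:
--         base256_int = base256_int * 256 + ord(char)
--
--     # Convert base-256 integer to base26 string
--     if base256_int == 0:
--         return 'A'  # Special case for empty input or input that equals zero
--
--     base26_str = ""
--     while base256_int > 0:
--         base26_str = chr(base256_int % 26 + 65) + base26_str
--         base256_int //= 26
--
--     return base26_str
-- ===== SOURCE B (Python) =====
-- _CHUNK = 26 ** 8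
--
--
-- def b26_encode(input_string):
--     # Base-256 value of the string, via the C-speed big-endian builtin.
--     n = int.from_bytes(input_string.encode('latin-1'), 'big')
--     if n == 0:
--         return 'A'  # empty input
--     # Peel off 8 base-26 digits at a time with one big-int divmod per chunk,
--     # then expand each chunk with cheap small-int divmods.
--     chunks = []
--     while n > 0:
--         n, r = divmod(n, _CHUNK)
--         chunks.append(r)
--     out = []
--     for r in chunks[:-1]:
--         for _ in range(8):  # non-leading chunks contribute exactly 8 digits
--             r, d = divmod(r, 26)
--             out.append(chr(d + 65))
--     r = chunks[-1]
--     while r > 0:  # leading chunk: no zero padding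
--         r, d = divmod(r, 26)
--         out.append(chr(d + 65))
--     out.reverse()
--     return ''.join(out)
-- ===== Notes on version B (the rewrite author's own statement) =====
-- stated objective: faster
-- what changed: B replaces the Horner loop over characters by int.from_bytes and replaces the one-digit-per-big-divmod loop with quadratic string prepending by chunked extraction (one big divmod per 8 digits, small-int divmods inside) into a list that is reversed and joined once.
import Mathlib
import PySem

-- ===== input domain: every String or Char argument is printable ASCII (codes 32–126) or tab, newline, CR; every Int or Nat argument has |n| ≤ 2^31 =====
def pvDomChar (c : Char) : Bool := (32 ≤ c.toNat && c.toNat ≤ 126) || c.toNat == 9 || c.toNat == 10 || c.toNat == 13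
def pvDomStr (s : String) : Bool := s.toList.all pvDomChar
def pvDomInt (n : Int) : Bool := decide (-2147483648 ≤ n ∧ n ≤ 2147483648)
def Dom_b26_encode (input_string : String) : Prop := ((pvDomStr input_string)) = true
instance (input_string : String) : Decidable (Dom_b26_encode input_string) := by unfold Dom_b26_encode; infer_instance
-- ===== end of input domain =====

-- B replaces A's Horner loop by the int.from_bytes value and A's one-digit-at-a-time
-- extraction with string prepending by chunked extraction (8 digits per big divmod)
-- into a list joined once; objective: faster (constant-factor, measured).

-- ===== PORT A =====

-- termination helper for the division loops (cited by name in decreasing_by)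
theorem pv_fd26_lt (n : Int) (h : 0 < n) :
    (PySem.Int.floordiv n 26).toNat < n.toNat := by
  rw [PySem.Int.floordiv_eq_ediv_of_pos (by omega)]; omega

-- while base256_int > 0: base26_str = chr(base256_int % 26 + 65) + base26_str; base256_int //= 26
def b26_encode_loop (n : Int) (acc : List Char) : List Char :=
  if h : 0 < n then
    b26_encode_loop (PySem.Int.floordiv n 26)
      (Char.ofNat (PySem.Int.mod n 26 + 65).toNat :: acc)
  else acc
termination_by n.toNat
decreasing_by exact pv_fd26_lt n h

def b26_encode (input_string : String) : String :=
  -- for char in input_string: base256_int = base256_int * 256 + ord(char)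
  let base256_int :=
    input_string.toList.foldl (fun acc c => acc * 256 + (c.toNat : Int)) 0
  if base256_int = 0 then "A"
  else String.mk (b26_encode_loop base256_int [])

-- ===== PORT B =====

theorem pv_fdC_lt (n : Int) (h : 0 < n) :
    (PySem.Int.floordiv n 208827064576).toNat < n.toNat := by
  rw [PySem.Int.floordiv_eq_ediv_of_pos (by omega)]; omega

-- while n > 0: n, r = divmod(n, _CHUNK); chunks.append(r)     (_CHUNK = 26 ** 8)
def pvB_chunks (n : Int) (acc : List Int) : List Int :=
  if h : 0 < n then
    pvB_chunks (PySem.Int.floordiv n 208827064576)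
      (acc ++ [PySem.Int.mod n 208827064576])
  else acc
termination_by n.toNat
decreasing_by exact pv_fdC_lt n h

-- for _ in range(8): r, d = divmod(r, 26); out.append(chr(d + 65))
def pvB_emit8 (r : Int) (out : List Char) : Nat → Int × List Char
  | 0 => (r, out)
  | k + 1 =>
      pvB_emit8 (PySem.Int.floordiv r 26)
        (out ++ [Char.ofNat (PySem.Int.mod r 26 + 65).toNat]) k

-- while r > 0: r, d = divmod(r, 26); out.append(chr(d + 65))
def pvB_emitLead (r : Int) (out : List Char) : List Char :=
  if h : 0 < r then
    pvB_emitLead (PySem.Int.floordiv r 26)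
      (out ++ [Char.ofNat (PySem.Int.mod r 26 + 65).toNat])
  else out
termination_by r.toNat
decreasing_by exact pv_fd26_lt r h

def b26_encode_alt (input_string : String) : String :=
  -- int.from_bytes(input_string.encode('latin-1'), 'big'): the big-endian byte value,
  -- i.e. exactly this fold over the code points (exact: all code points ≤ 255 on Dom)
  let n := input_string.toList.foldl (fun acc c => acc * 256 + (c.toNat : Int)) 0
  if n = 0 then "A"
  else
    let chunks := pvB_chunks n []
    -- for r in chunks[:-1]: …    (chunks[:-1] = dropLast)
    let out := chunks.dropLast.foldl (fun out r => (pvB_emit8 r out 8).2) []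
    -- r = chunks[-1]  (chunks is nonempty here since n > 0)
    let out := pvB_emitLead ((PySem.List.pyGet? chunks (-1)).getD 0) out
    -- out.reverse(); ''.join(out)
    String.mk out.reverse

-- ===== PRECONDITION & SPEC =====
def Spec_b26_encode (input_string : String) (out : String) : Prop := out = b26_encode_alt input_string
instance (input_string : String) (out : String) : Decidable (Spec_b26_encode input_string out) := by unfold Spec_b26_encode; infer_instance

-- ===== CLAIM (what is proved, stated in full; the proofs are below) =====
def Claim_equal_b26_encode : Prop := ∀ (input_string : String), Dom_b26_encode input_string → Spec_b26_encode input_string (b26_encode input_string)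

-- ===== LEMMAS AND PROOFS =====

-- the base-26 digits of n, least significant first
def pvD (n : Int) : List Char :=
  if h : 0 < n then
    Char.ofNat (PySem.Int.mod n 26 + 65).toNat :: pvD (PySem.Int.floordiv n 26)
  else []
termination_by n.toNat
decreasing_by exact pv_fd26_lt n h

-- exactly k base-26 digits of r, least significant first, zero-padded
def pvDK (r : Int) : Nat → List Char
  | 0 => []
  | k + 1 => Char.ofNat (PySem.Int.mod r 26 + 65).toNat :: pvDK (PySem.Int.floordiv r 26) k

-- the chunk residues of n, least significant first
def pvCL (n : Int) : List Int :=
  if h : 0 < n then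
    PySem.Int.mod n 208827064576 :: pvCL (PySem.Int.floordiv n 208827064576)
  else []
termination_by n.toNat
decreasing_by exact pv_fdC_lt n h

theorem pvA_loop_eq (n : Int) (acc : List Char) :
    b26_encode_loop n acc = (pvD n).reverse ++ acc := by
  induction n, acc using b26_encode_loop.induct with
  | case1 n acc h ih =>
      rw [b26_encode_loop, dif_pos h, pvD, dif_pos h, ih]
      simp
  | case2 n acc h =>
      rw [b26_encode_loop, dif_neg h, pvD, dif_neg h]
      simp

theorem pvB_chunks_eq (n : Int) (acc : List Int) : pvB_chunks n acc = acc ++ pvCL n := by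
  induction n, acc using pvB_chunks.induct with
  | case1 n acc h ih =>
      rw [pvB_chunks, dif_pos h, pvCL, dif_pos h, ih]
      simp
  | case2 n acc h =>
      rw [pvB_chunks, dif_neg h, pvCL, dif_neg h]
      simp

theorem pvB_emitLead_eq (r : Int) (out : List Char) : pvB_emitLead r out = out ++ pvD r := by
  induction r, out using pvB_emitLead.induct with
  | case1 r out h ih =>
      rw [pvB_emitLead, dif_pos h, pvD, dif_pos h, ih]
      simp
  | case2 r out h =>
      rw [pvB_emitLead, dif_neg h, pvD, dif_neg h]
      simp

theorem pvB_emit8_eq (k : Nat) : ∀ (r : Int) (out : List Char),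
    (pvB_emit8 r out k).2 = out ++ pvDK r k := by
  induction k with
  | zero => intro r out; simp [pvB_emit8, pvDK]
  | succ k ih => intro r out; rw [pvB_emit8, ih, pvDK]; simp

-- key chunking identity: for 0 < q and 0 ≤ r < 26^k,
-- the digits of q*26^k + r are the k padded digits of r followed by the digits of q
theorem pv_chunk_digits (k : Nat) : ∀ (q r : Int), 0 < q → 0 ≤ r → r < 26 ^ k →
    pvD (q * 26 ^ k + r) = pvDK r k ++ pvD q := by
  induction k with
  | zero =>
      intro q r hq hr0 hr
      have : r = 0 := by omega
      subst this
      simp [pvDK]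
  | succ k ih =>
      intro q r hq hr0 hr
      have hP : (0:Int) < 26 ^ k := by positivity
      have hn : 0 < q * 26 ^ (k + 1) + r := by nlinarith
      have hsplit : q * 26 ^ (k + 1) + r = r + (q * 26 ^ k) * 26 := by ring
      have hmod : PySem.Int.mod (q * 26 ^ (k + 1) + r) 26 = PySem.Int.mod r 26 := by
        rw [PySem.Int.mod_eq_emod_of_pos (by omega), PySem.Int.mod_eq_emod_of_pos (by omega),
          hsplit]
        set m := q * 26 ^ k
        omega
      have hdiv : PySem.Int.floordiv (q * 26 ^ (k + 1) + r) 26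
          = q * 26 ^ k + PySem.Int.floordiv r 26 := by
        rw [PySem.Int.floordiv_eq_ediv_of_pos (by omega : (0:Int) < 26),
          PySem.Int.floordiv_eq_ediv_of_pos (by omega : (0:Int) < 26), hsplit]
        set m := q * 26 ^ k
        omega
      rw [pvD, dif_pos hn, hmod, hdiv, pvDK]
      have hr26 : 0 ≤ PySem.Int.floordiv r 26 := by
        rw [PySem.Int.floordiv_eq_ediv_of_pos (by omega)]; omega
      have hrlt : PySem.Int.floordiv r 26 < 26 ^ k := by
        rw [PySem.Int.floordiv_eq_ediv_of_pos (by omega)]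
        have : r < 26 * 26 ^ k := by
          have := hr; rw [pow_succ] at this; nlinarith
        omega
      rw [ih (q) (PySem.Int.floordiv r 26) hq hr26 hrlt]
      simp

-- the whole B digit phase produces exactly the digit list of n
theorem pvB_digits (n : Int) (h : 0 < n) : ∀ out,
    pvB_emitLead ((PySem.List.pyGet? (pvCL n) (-1)).getD 0)
      ((pvCL n).dropLast.foldl (fun out r => (pvB_emit8 r out 8).2) out)
    = out ++ pvD n := by
  induction n using pvCL.induct with
  | case1 n hn ih =>
      intro out
      set n' := PySem.Int.floordiv n 208827064576 with hn'def
      set r := PySem.Int.mod n 208827064576 with hrdef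
      rw [pvCL, dif_pos hn, ← hn'def, ← hrdef]
      by_cases h' : 0 < n'
      · have hcons : pvCL n' ≠ [] := by rw [pvCL, dif_pos h']; simp
        rw [List.dropLast_cons_of_ne_nil hcons]
        have hlast : PySem.List.pyGet? (r :: pvCL n') (-1) = (pvCL n').getLast? := by
          rw [PySem.List.pyGet?_neg_one]
          obtain ⟨x, t, hx⟩ := List.exists_cons_of_ne_nil hcons
          rw [hx, List.getLast?_cons_cons]
        rw [hlast]
        have hfold : (r :: (pvCL n').dropLast).foldl (fun out r => (pvB_emit8 r out 8).2) out
            = (pvCL n').dropLast.foldl (fun out r => (pvB_emit8 r out 8).2)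
                (out ++ pvDK r 8) := by
          simp [List.foldl_cons, pvB_emit8_eq]
        rw [hfold]
        have := ih h' (out ++ pvDK r 8)
        rw [PySem.List.pyGet?_neg_one] at this
        rw [this]
        have hsplit : n = n' * 26 ^ 8 + r := by
          have := PySem.Int.floordiv_mul_add_mod n 208827064576
          rw [← hn'def, ← hrdef] at this
          norm_num
          omega
        have hr0 : 0 ≤ r := PySem.Int.mod_nonneg n (by norm_num)
        have hrlt : r < 26 ^ 8 := by
          have := PySem.Int.mod_lt n (b := 208827064576) (by norm_num)
          rw [← hrdef] at this; norm_num; omega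
        rw [hsplit, pv_chunk_digits 8 n' r h' hr0 hrlt]
        simp
      · -- single chunk: n < 26^8, r = n
        have hcl : pvCL n' = [] := by rw [pvCL, dif_neg h']
        have hreq : r = n := by
          have := PySem.Int.floordiv_mul_add_mod n 208827064576
          rw [← hn'def, ← hrdef] at this
          have hn'0 : n' = 0 := by
            have h0 : 0 ≤ n' := by
              rw [hn'def, PySem.Int.floordiv_eq_ediv_of_pos (by norm_num)]; omega
            omega
          rw [hn'0] at this; omega
        rw [hcl]
        simp only [show ∀ x : Int, ([x] : List Int).dropLast = [] from fun _ => rfl,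
          List.foldl_nil]
        rw [PySem.List.pyGet?_neg_one]
        simp only [List.getLast?_singleton, Option.getD_some]
        rw [pvB_emitLead_eq, hreq]
  | case2 n hn => exact absurd h hn

-- the fold computing base256_int never goes negative
theorem pv_fold_nonneg (l : List Char) : ∀ a : Int, 0 ≤ a →
    0 ≤ l.foldl (fun acc c => acc * 256 + (c.toNat : Int)) a := by
  induction l with
  | nil => intro a ha; simpa using ha
  | cons c t ih =>
      intro a ha
      simp only [List.foldl_cons]
      exact ih _ (by positivity)

-- ===== VERDICT (by name: the statement is the Claim_ definition above) =====
theorem b26_encode_spec : Claim_equal_b26_encode := by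
  intro s _
  unfold Spec_b26_encode b26_encode b26_encode_alt
  set n := s.toList.foldl (fun acc c => acc * 256 + (c.toNat : Int)) 0 with hn
  by_cases h0 : n = 0
  · simp [h0]
  · have hpos : 0 < n := by
      have := pv_fold_nonneg s.toList 0 le_rfl
      rw [← hn] at this; omega
    simp only [if_neg h0]
    rw [pvA_loop_eq, pvB_chunks_eq n []]
    have := pvB_digits n hpos []
    simp only [List.nil_append] at this ⊢
    rw [this]
    simp
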